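-- pv_equiv track=rewrite | github.com/FreddyMachaca/INF-111 | PRACTICA PRIMER PARCIAL/Ejercicio14/Python/GenerarSecuencia.py | generar_secuencia
-- ===== SOURCE A (Python) =====
-- def generar_secuencia(n):
--     secuencia = []
--     indice = 1
--     incremento = 1
--
--     for i in range(n):
--         if i % 3 == 2:
--             secuencia.append(-5)
--         else:
--             secuencia.append(indice)
--             indice += incremento
--             incremento += 1
--
--     return secuencia
-- ===== SOURCE B (Python) =====
-- def generar_secuencia(n):
--     def val(i):
--         if i % 3 == 2:
--             return -5
--         k = i - (i + 1) // 3
--         return 1 + k * (k + 1) // 2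
--     return [val(i) for i in range(n)]
-- ===== Notes on version B (the rewrite author's own statement) =====
-- stated objective: alternative
-- what changed: Replaced the stateful accumulator loop (indice/incremento carried across iterations) by a direct per-index closed-form formula: position i maps to -5 when i%3==2, else 1 + k*(k+1)//2 with k = i - (i+1)//3.
import Mathlib
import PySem

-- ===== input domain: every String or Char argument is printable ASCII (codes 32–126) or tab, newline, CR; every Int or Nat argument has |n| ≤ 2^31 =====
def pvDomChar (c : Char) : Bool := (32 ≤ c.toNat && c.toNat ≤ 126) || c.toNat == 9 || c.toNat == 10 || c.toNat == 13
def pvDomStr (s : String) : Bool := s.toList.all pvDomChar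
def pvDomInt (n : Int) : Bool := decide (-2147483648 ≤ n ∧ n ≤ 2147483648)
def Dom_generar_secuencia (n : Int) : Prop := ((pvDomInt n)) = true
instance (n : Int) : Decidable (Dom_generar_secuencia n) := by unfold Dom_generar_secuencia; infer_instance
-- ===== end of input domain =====

-- B replaces A's running indice/incremento accumulator state by a per-index closed-form formula (objective: alternative, same O(n) cost).

-- ===== PORT A =====
def gsStep (st : List Int × Int × Int) (i : Int) : List Int × Int × Int :=
  if PySem.Int.mod i 3 = 2 then (st.1 ++ [-5], st.2.1, st.2.2)
  else (st.1 ++ [st.2.1], st.2.1 + st.2.2, st.2.2 + 1)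

def generar_secuencia (n : Int) : List Int :=
  ((PySem.List.pyRange 0 n 1).foldl gsStep ([], 1, 1)).1

-- ===== PORT B =====
def gsVal (i : Int) : Int :=
  if PySem.Int.mod i 3 = 2 then -5
  else
    let k := i - PySem.Int.floordiv (i + 1) 3
    1 + PySem.Int.floordiv (k * (k + 1)) 2

def generar_secuencia_alt (n : Int) : List Int :=
  (PySem.List.pyRange 0 n 1).map gsVal

-- ===== PRECONDITION & SPEC =====
def Spec_generar_secuencia (n : Int) (out : List Int) : Prop := out = generar_secuencia_alt n
instance (n : Int) (out : List Int) : Decidable (Spec_generar_secuencia n out) := by unfold Spec_generar_secuencia; infer_instance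

-- ===== CLAIM (what is proved, stated in full; the proofs are below) =====
def Claim_equal_generar_secuencia : Prop := ∀ (n : Int), Dom_generar_secuencia n → Spec_generar_secuencia n (generar_secuencia n)

-- ===== LEMMAS AND PROOFS =====

-- invariant: after the first m iterations, A's state is (B's values so far, 1 + c(c+1)/2, c+1) with c = m - m/3
lemma gs_tri_succ (c : Nat) : (c + 1) * (c + 1 + 1) / 2 = c * (c + 1) / 2 + (c + 1) := by
  have h : (c + 1) * (c + 1 + 1) = c * (c + 1) + 2 * (c + 1) := by ring
  have h2 : 2 ∣ c * (c + 1) := (Nat.even_mul_succ_self c).two_dvd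
  omega

lemma gs_key (m : Nat) :
    List.foldl gsStep ([], 1, 1) ((List.range m).map (fun (k : Nat) => ((0:Int) + (k:Int)))) =
      ((List.range m).map (fun (k : Nat) => gsVal ((0:Int) + (k:Int))),
       1 + (((m - m/3) * ((m - m/3) + 1) / 2 : Nat) : Int),
       ((m - m/3 : Nat) : Int) + 1) := by
  induction m with
  | zero => simp
  | succ m ih =>
      rw [List.range_succ, List.map_append, List.foldl_append, ih, List.map_append]
      simp only [List.map_cons, List.map_nil, List.foldl_cons, List.foldl_nil]
      by_cases h : m % 3 = 2
      · have hm : PySem.Int.mod ((0:Int) + (m:Int)) 3 = 2 := by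
          rw [PySem.Int.mod_eq_emod_of_pos (by omega)]; omega
        have hv : gsVal ((0:Int) + (m:Int)) = -5 := by
          unfold gsVal; rw [if_pos hm]
        have hc : (m + 1) - (m + 1) / 3 = m - m / 3 := by omega
        simp only [gsStep]
        rw [if_pos hm, hv, hc]
      · have hm : ¬ PySem.Int.mod ((0:Int) + (m:Int)) 3 = 2 := by
          rw [PySem.Int.mod_eq_emod_of_pos (by omega)]; omega
        have hc : (m + 1) - (m + 1) / 3 = (m - m / 3) + 1 := by omega
        have hv : gsVal ((0:Int) + (m:Int)) = 1 + (((m - m/3) * ((m - m/3) + 1) / 2 : Nat) : Int) := by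
          have hk : (0:Int) + (m:Int) - PySem.Int.floordiv ((0:Int) + (m:Int) + 1) 3
              = ((m - m/3 : Nat) : Int) := by
            rw [PySem.Int.floordiv_eq_ediv_of_pos (by omega : (0:Int) < 3)]; omega
          simp only [gsVal, if_neg hm, hk]
          rw [PySem.Int.floordiv_eq_ediv_of_pos (by omega : (0:Int) < 2)]
          have hcast : ((m - m/3 : Nat) : Int) * (((m - m/3 : Nat) : Int) + 1)
              = (((m - m/3) * ((m - m/3) + 1) : Nat) : Int) := by push_cast; ring
          rw [hcast]
          omega
        simp only [gsStep]
        rw [if_neg hm, hv, hc]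
        refine congrArg₂ _ rfl (congrArg₂ _ ?_ ?_)
        · rw [gs_tri_succ]; push_cast; ring
        · push_cast; ring

-- ===== VERDICT (by name: the statement is the Claim_ definition above) =====
theorem generar_secuencia_spec : Claim_equal_generar_secuencia := by
  intro n _
  unfold Spec_generar_secuencia generar_secuencia generar_secuencia_alt
  rw [PySem.List.pyRange_one]
  simp only [Int.sub_zero]
  rw [gs_key]
  simp [List.map_map, Function.comp_def]
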